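-- pv_equiv track=rewrite | github.com/codminge/CodingTest | 프로그래머스/0/181864. 문자열 바꿔서 찾기/문자열 바꿔서 찾기.py | solution
-- ===== SOURCE A (Python) =====
-- def solution(myString, pat):
--     answer = 0
--     temp = list(myString)
--     myString = myString.replace("A", "B")
--     myString = list(myString)
--     idx = len(myString)
--
--     for i in range(0, idx, 1):
--         if temp[i] == "B":
--             myString[i] = "A"
--     myString = ''.join(myString)
--
--     if pat in myString:
--         answer = 1
--     return answer
-- ===== SOURCE B (Python) =====
-- def solution(myString, pat):
--     # Swap A<->B in the (small) needle instead of the haystack: the swap is an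
--     # involutive bijection on characters, so pat occurs in swapped(myString)
--     # iff swapped(pat) occurs in myString.
--     swapped = pat.translate(str.maketrans("AB", "BA"))
--     return 1 if swapped in myString else 0
-- ===== Notes on version B (the rewrite author's own statement) =====
-- stated objective: faster
-- what changed: Instead of rebuilding the whole haystack (replace + index loop over a char list + join) and searching it, B swaps A/B in the short needle pat via str.translate and runs one substring test on the untouched myString.
import Mathlib
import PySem

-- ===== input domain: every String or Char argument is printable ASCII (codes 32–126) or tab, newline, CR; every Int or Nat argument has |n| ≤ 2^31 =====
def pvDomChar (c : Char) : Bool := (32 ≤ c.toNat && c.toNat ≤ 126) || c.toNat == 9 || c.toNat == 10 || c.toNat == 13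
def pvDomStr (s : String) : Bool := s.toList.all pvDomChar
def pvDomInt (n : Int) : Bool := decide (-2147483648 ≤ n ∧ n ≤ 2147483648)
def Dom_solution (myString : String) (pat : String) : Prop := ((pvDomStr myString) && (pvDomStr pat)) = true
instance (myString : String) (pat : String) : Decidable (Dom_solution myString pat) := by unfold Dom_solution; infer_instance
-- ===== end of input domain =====

-- B swaps A/B in the needle pat and searches the untouched myString (the swap is an involution), instead of rebuilding the haystack; return value equivalence, A does not observably mutate its arguments.


-- ===== PORT A =====
-- literal transliteration: temp = list(myString); replace A->B; index loop writing 'A'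
-- where temp[i] == 'B' (temp[i] via pyGetD: i always in range since the two lists have
-- equal length, so Python's IndexError is unreachable); join; substring test.
def solution (myString : String) (pat : String) : Int :=
  let answer : Int := 0
  let temp : List Char := myString.toList
  let ms : List Char := (PySem.Str.replace myString "A" "B").toList
  let idx : Int := (ms.length : Int)
  let ms : List Char :=
    (PySem.List.pyRange 0 idx 1).foldl
      (fun acc i => if PySem.List.pyGetD temp i ' ' = 'B' then acc.set i.toNat 'A' else acc) ms
  let answer : Int := if PySem.Chars.isIn pat.toList ms then 1 else answer
  answer

-- ===== PORT B =====
-- str.maketrans("AB","BA") applied to a character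
def swapAB (c : Char) : Char := if c = 'A' then 'B' else if c = 'B' then 'A' else c

def solution_alt (myString : String) (pat : String) : Int :=
  let swapped : List Char := pat.toList.map swapAB
  if PySem.Chars.isIn swapped myString.toList then 1 else 0

-- ===== PRECONDITION & SPEC =====
def Spec_solution (myString : String) (pat : String) (out : Int) : Prop := out = solution_alt myString pat
instance (myString : String) (pat : String) (out : Int) : Decidable (Spec_solution myString pat out) := by unfold Spec_solution; infer_instance

-- ===== CLAIM (what is proved, stated in full; the proofs are below) =====
def Claim_equal_solution : Prop := ∀ (myString : String) (pat : String), Dom_solution myString pat → Spec_solution myString pat (solution myString pat)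

-- ===== LEMMAS AND PROOFS =====

-- replace "A" -> "B" on a single-character pattern is a pointwise map
def repAB (c : Char) : Char := if c = 'A' then 'B' else c

theorem replace_go_single (fuel : Nat) (s acc : List Char) (h : s.length ≤ fuel) :
    PySem.Chars.replace.go ['A'] ['B'] fuel s acc = acc.reverse ++ s.map repAB := by
  induction fuel generalizing s acc with
  | zero =>
    have : s = [] := List.eq_nil_of_length_eq_zero (Nat.le_zero.mp h)
    subst this
    simp [PySem.Chars.replace.go]
  | succ n ih =>
    cases s with
    | nil => simp [PySem.Chars.replace.go]
    | cons c t =>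
      by_cases hc : c = 'A'
      · subst hc
        have hp : List.isPrefixOf ['A'] ('A' :: t) = true := by simp [List.isPrefixOf]
        simp only [PySem.Chars.replace.go, hp]
        rw [ih] <;> simp_all [repAB]
      · have hp : List.isPrefixOf ['A'] (c :: t) = false := by
          simp only [List.isPrefixOf]
          simpa using fun e => hc e.symm
        simp only [PySem.Chars.replace.go, hp]
        rw [if_neg Bool.false_ne_true, ih t (c :: acc) (by simpa using Nat.lt_succ_iff.mp (by simpa using h))]
        simp [repAB, hc]

theorem replace_single (s : List Char) :
    PySem.Chars.replace s ['A'] ['B'] = s.map repAB := by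
  simp only [PySem.Chars.replace, List.isEmpty_cons]
  rw [if_neg (by decide), replace_go_single s.length s [] (le_refl _)]
  simp

theorem set_at_len (xs ys : List Char) (v y : Char) (m : Nat) (h : xs.length = m) :
    (xs ++ y :: ys).set m v = xs ++ v :: ys := by
  subst h
  induction xs with
  | nil => simp
  | cons a t ih => simp [ih]

-- the loop restores 'A' exactly at positions where the original char was 'B':
-- composed with repAB this is the A<->B swap
theorem loop_fix (temp : List Char) (n : Nat) (h : n ≤ temp.length) :
    (PySem.List.pyRange 0 (n : Int) 1).foldl
      (fun acc i => if PySem.List.pyGetD temp i ' ' = 'B' then acc.set i.toNat 'A' else acc)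
      (temp.map repAB)
    = (temp.take n).map swapAB ++ (temp.map repAB).drop n := by
  induction n with
  | zero => simp [PySem.List.pyRange_one_eq_nil]
  | succ m ih =>
    have hm : m ≤ temp.length := Nat.le_of_succ_le h
    have hmlt : m < temp.length := h
    rw [show ((m + 1 : Nat) : Int) = (m : Int) + 1 by push_cast; ring,
        PySem.List.pyRange_one_succ_right (by positivity), List.foldl_append, ih hm]
    simp only [List.foldl_cons, List.foldl_nil]
    have hget : PySem.List.pyGetD temp (m : Int) ' ' = temp[m] := by
      rw [PySem.List.pyGetD_natCast]
      simp [hmlt]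
    have hdrop : (temp.map repAB).drop m = repAB temp[m] :: (temp.map repAB).drop (m + 1) := by
      rw [List.drop_eq_getElem_cons (by simpa using hmlt)]
      simp
    have hlen : ((temp.take m).map swapAB).length = m := by
      simp [List.length_take, Nat.min_eq_left hm]
    have htake : temp.take (m + 1) = temp.take m ++ [temp[m]] := by
      rw [List.take_add_one]
      simp [List.getElem?_eq_getElem hmlt]
    rw [hget, hdrop, htake]
    by_cases hb : temp[m] = 'B'
    · rw [if_pos hb, show ((m : Int)).toNat = m from Int.toNat_natCast m,
          set_at_len _ _ _ _ _ hlen]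
      simp [swapAB, hb]
    · rw [if_neg hb]
      have hrs : repAB temp[m] = swapAB temp[m] := by
        by_cases ha : temp[m] = 'A' <;> simp [repAB, swapAB, ha, hb]
      have htk : (List.map swapAB temp).take (m + 1)
          = (List.map swapAB temp).take m ++ [swapAB temp[m]] := by
        rw [List.take_add_one]
        simp [List.getElem?_eq_getElem hmlt]
      simp [hrs, htk]

theorem swapAB_swapAB (c : Char) : swapAB (swapAB c) = c := by
  unfold swapAB
  by_cases h1 : c = 'A'
  · simp [h1]
  · by_cases h2 : c = 'B' <;> simp [h1, h2]

theorem infix_map_swap (p s : List Char) :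
    p <:+: s.map swapAB ↔ p.map swapAB <:+: s := by
  constructor
  · intro h
    have := h.map swapAB
    simpa [List.map_map, Function.comp_def, swapAB_swapAB] using this
  · intro h
    have := h.map swapAB
    simpa [List.map_map, Function.comp_def, swapAB_swapAB] using this

-- ===== VERDICT (by name: the statement is the Claim_ definition above) =====
theorem solution_spec : Claim_equal_solution := by
  intro myString pat _
  unfold Spec_solution solution solution_alt
  simp only [PySem.Str.toList_replace]
  rw [show "A".toList = ['A'] from rfl, show "B".toList = ['B'] from rfl, replace_single]
  have hlen : (myString.toList.map repAB).length = myString.toList.length := by simp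
  rw [show ((myString.toList.map repAB).length : Int) = ((myString.toList.length : Nat) : Int) by
        rw [hlen],
      loop_fix myString.toList myString.toList.length (le_refl _)]
  rw [show List.drop myString.toList.length (List.map repAB myString.toList) = ([] : List Char)
        from by simp, List.append_nil, List.take_length]
  have hiff := infix_map_swap pat.toList myString.toList
  by_cases h : PySem.Chars.isIn pat.toList (myString.toList.map swapAB) = true
  · rw [if_pos h]
    rw [PySem.Chars.isIn_iff_infix] at h
    rw [if_pos (PySem.Chars.isIn_iff_infix _ _ |>.mpr (hiff.mp h))]
  · rw [if_neg h]
    rw [if_neg]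
    intro hc
    exact h (PySem.Chars.isIn_iff_infix _ _ |>.mpr (hiff.mpr (PySem.Chars.isIn_iff_infix _ _ |>.mp hc)))
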